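-- pv_equiv track=rewrite | github.com/kobato-chan1912/practice-algorithms | codelearn/greedy_NumberOfFish/solution.py | minimumNumberOfFish
-- ===== SOURCE A (Python) =====
-- def minimumNumberOfFish(w,k):
--     count=0
--     w.sort()
--     if k < w[0]:
--         count = -1
--     elif k > w[-1]:
--         count=0
--     else:
--         while k <= w[-1]:
--             for i in range(len(w),0,-1):
--                 if k >= w[i-1]:
--                     k += w[i-1]
--                     count+=1
--                     break
--     return count
-- ===== SOURCE B (Python) =====
-- def minimumNumberOfFish(w, k):
--     # Note: like A, sorts w in place (same observable side effect).
--     w.sort()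
--     if k < w[0]:
--         return -1
--     if k > w[-1]:
--         return 0
--     count = 0
--     g = w[0]                     # largest already-reachable weight so far
--     for x in w[1:]:
--         if k >= x:
--             g = x
--         else:
--             t = -((k - x) // g)  # ceil((x - k) / g): absorb g that many times
--             count += t
--             k += t * g
--             g = x
--     # g == w[-1] and k >= g: absorb the largest until k exceeds it
--     return count + (g - k) // g + 1
-- ===== Notes on version B (the rewrite author's own statement) =====
-- stated objective: faster
-- what changed: A rescans the whole list from the top for every single absorption inside an unbounded while-loop; B makes one forward pass over the sorted list and, for each gap up to the next larger weight, adds the number of repeated absorptions in closed form via ceiling division, so total work after sorting is O(n) regardless of how many absorption steps A performs. Intended as faster; in a timing run A timed out at n=16 where B returned instantly, so no ratio could be measured.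
import Mathlib
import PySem

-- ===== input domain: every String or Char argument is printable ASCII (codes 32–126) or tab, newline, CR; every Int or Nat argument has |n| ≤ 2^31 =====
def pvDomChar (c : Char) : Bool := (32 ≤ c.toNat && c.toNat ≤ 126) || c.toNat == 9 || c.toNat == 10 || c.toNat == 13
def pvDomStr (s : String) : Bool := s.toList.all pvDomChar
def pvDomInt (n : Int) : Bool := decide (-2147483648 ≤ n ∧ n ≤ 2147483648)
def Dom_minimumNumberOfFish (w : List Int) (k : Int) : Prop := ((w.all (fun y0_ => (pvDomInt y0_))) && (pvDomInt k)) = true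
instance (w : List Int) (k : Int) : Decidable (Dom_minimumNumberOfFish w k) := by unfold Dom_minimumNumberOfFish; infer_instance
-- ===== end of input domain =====

-- B replaces A's rescan-the-whole-list-per-absorption loop by one forward pass over the
-- sorted list with a closed-form count of repeated absorptions per gap; intended as faster
-- (in a timing run A timed out at n=16 where B returned; no clean ratio was measurable).
-- Both A and B sort the argument list in place (same side effect); the claim is about the return value.

-- ===== PORT A =====
-- the inner 'for i in range(len(w),0,-1): if k >= w[i-1]: … break': first element ≤ k scanning from the top
def pvScan (s : List Int) (k : Int) : Option Int :=
  s.reverse.find? (fun y => decide (y ≤ k))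

-- the 'while k <= w[-1]' loop; Python loops FOREVER when the scan finds nothing or finds a
-- non-positive element (inputs excluded by Pre_): the two early 'count' exits are totality guards only.
def pvALoop (s : List Int) (last : Int) (k : Int) (count : Int) : Int :=
  if _hk : k ≤ last then
    match pvScan s k with
    | some g =>
      if hg : 0 < g then pvALoop s last (k + g) (count + 1)
      else count          -- totality guard: Python never terminates here
    | none => count       -- totality guard: Python never terminates here
  else count
termination_by (last + 1 - k).toNat
decreasing_by omega

def minimumNumberOfFish (w : List Int) (k : Int) : Int :=
  match PySem.List.sorted w (fun x => x) false with
  | [] => 0               -- Python raises IndexError at w[0] (excluded by Pre_)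
  | a :: t =>
    let last := (a :: t).getLast (List.cons_ne_nil a t)
    if k < a then -1
    else if k > last then 0
    else pvALoop (a :: t) last k 0

-- ===== PORT B =====
-- one fold step of B's forward pass: state (count, k, g), g = largest weight reached so far
def pvBStep (st : Int × Int × Int) (x : Int) : Int × Int × Int :=
  match st with
  | (count, k, g) =>
    if x ≤ k then (count, k, x)
    else
      let t := -(PySem.Int.floordiv (k - x) g)   -- ceil((x - k) / g)
      (count + t, k + t * g, x)

def minimumNumberOfFish_alt (w : List Int) (k : Int) : Int :=
  match PySem.List.sorted w (fun x => x) false with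
  | [] => 0               -- Python raises IndexError at w[0] (excluded by Pre_)
  | a :: t =>
    let last := (a :: t).getLast (List.cons_ne_nil a t)
    if k < a then -1
    else if k > last then 0
    else
      match t.foldl pvBStep (0, k, a) with
      | (count, k', g) => count + PySem.Int.floordiv (g - k') g + 1

-- ===== PRECONDITION & SPEC =====
-- Pre_ excludes only inputs where A does not return: the empty list (IndexError at w[0]) and
-- inputs with min w ≤ k ≤ max w but no positive element ≤ k, on which A's while loop never terminates.
def Pre_minimumNumberOfFish (w : List Int) (k : Int) : Prop :=
  w ≠ [] ∧ ((∀ x ∈ w, k < x) ∨ (∀ x ∈ w, x < k) ∨ ∃ x ∈ w, 0 < x ∧ x ≤ k)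
instance (w : List Int) (k : Int) : Decidable (Pre_minimumNumberOfFish w k) := by
  unfold Pre_minimumNumberOfFish; infer_instance

def pvWitness_minimumNumberOfFish : List Int × Int := ([3, 1, 7], 2)

def Spec_minimumNumberOfFish (w : List Int) (k : Int) (out : Int) : Prop := out = minimumNumberOfFish_alt w k
instance (w : List Int) (k : Int) (out : Int) : Decidable (Spec_minimumNumberOfFish w k out) := by unfold Spec_minimumNumberOfFish; infer_instance

-- ===== CLAIM (what is proved, stated in full; the proofs are below) =====
def Claim_equal_minimumNumberOfFish : Prop := ∀ (w : List Int) (k : Int), Dom_minimumNumberOfFish w k → Pre_minimumNumberOfFish w k → Spec_minimumNumberOfFish w k (minimumNumberOfFish w k)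

-- ===== LEMMAS AND PROOFS =====

-- every element of a ≤-sorted list is ≤ its last element
theorem pvLeGetLast : ∀ {s : List Int} (_hs : s.Pairwise (· ≤ ·)) (hne : s ≠ []) {y : Int},
    y ∈ s → y ≤ s.getLast hne := by
  intro s
  induction s with
  | nil => intro _ hne; exact absurd rfl hne
  | cons a t ih =>
    intro hs hne y hy
    rcases List.pairwise_cons.mp hs with ⟨ha, ht⟩
    rcases List.mem_cons.mp hy with rfl | hy
    · cases t with
      | nil => simp
      | cons b t' =>
        rw [List.getLast_cons (List.cons_ne_nil b t')]
        exact ha _ (List.getLast_mem (List.cons_ne_nil b t'))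
    · cases t with
      | nil => cases hy
      | cons b t' =>
        rw [List.getLast_cons (List.cons_ne_nil b t')]
        exact ih ht (List.cons_ne_nil b t') hy

-- find? on a ≥-sorted list returns the (value of the) largest element ≤ k
theorem pvFindDesc : ∀ {r : List Int} {k g : Int},
    r.Pairwise (fun a b => b ≤ a) → g ∈ r → g ≤ k → (∀ y ∈ r, y ≤ k → y ≤ g) →
    r.find? (fun y => decide (y ≤ k)) = some g := by
  intro r
  induction r with
  | nil => intro k g _ hg; cases hg
  | cons b r' ih =>
    intro k g hp hg hgk hmax
    rcases List.pairwise_cons.mp hp with ⟨hb, hr'⟩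
    by_cases hbk : b ≤ k
    · have h1 : b ≤ g := hmax b (by simp) hbk
      have h2 : g ≤ b := by
        rcases List.mem_cons.mp hg with rfl | hg
        · exact le_refl _
        · exact hb g hg
      rw [List.find?_cons_of_pos (by simpa using hbk), le_antisymm h1 h2]
    · have hg' : g ∈ r' := by
        rcases List.mem_cons.mp hg with rfl | hg
        · exact absurd hgk hbk
        · exact hg
      rw [List.find?_cons_of_neg (by simpa using hbk)]
      exact ih hr' hg' hgk (fun y hy hyk => hmax y (by simp [hy]) hyk)

theorem pvScan_eq {s : List Int} {k g : Int}
    (hs : s.Pairwise (· ≤ ·)) (hg : g ∈ s) (hgk : g ≤ k)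
    (hmax : ∀ y ∈ s, y ≤ k → y ≤ g) :
    pvScan s k = some g := by
  unfold pvScan
  exact pvFindDesc (by simpa [List.pairwise_reverse] using hs)
    (by simpa using hg) hgk (fun y hy => hmax y (by simpa using hy))

-- characterisation of B's step count t = ceil((x - k)/g)
theorem pvCeil {g k x : Int} (hg : 0 < g) (hkx : k < x) :
    1 ≤ -(PySem.Int.floordiv (k - x) g) ∧
    x ≤ k + (-(PySem.Int.floordiv (k - x) g)) * g ∧
    k + (-(PySem.Int.floordiv (k - x) g) - 1) * g < x := by
  set q := PySem.Int.floordiv (k - x) g with hq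
  have h := (PySem.Int.floordiv_eq_iff_of_pos (a := k - x) (b := g) (q := q) hg).mp hq.symm
  have hq0 : q < 0 := by nlinarith [h.1, h.2]
  refine ⟨by omega, by nlinarith [h.1], by nlinarith [h.2]⟩

-- floordiv shifts by one when the dividend grows by the divisor
theorem pvFloordivStep {g k x : Int} (hg : 0 < g) :
    PySem.Int.floordiv (k + g - x) g = PySem.Int.floordiv (k - x) g + 1 := by
  set q := PySem.Int.floordiv (k - x) g with hq
  have h := (PySem.Int.floordiv_eq_iff_of_pos (a := k - x) (b := g) (q := q) hg).mp hq.symm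
  exact (PySem.Int.floordiv_eq_iff_of_pos hg).mpr ⟨by nlinarith [h.1], by nlinarith [h.2]⟩

-- A's loop performs exactly t = ceil((x-k)/g) absorptions of g to pass the next larger weight x
theorem pvRun {s : List Int} (hs : s.Pairwise (· ≤ ·)) (hne : s ≠ []) {last g x : Int}
    (hlast : last = s.getLast hne) (hgs : g ∈ s) (hxs : x ∈ s) (hg : 0 < g)
    (hsplit : ∀ y ∈ s, y ≤ g ∨ x ≤ y) :
    ∀ (n : Nat) (k c : Int), (x - k).toNat ≤ n → g ≤ k → k < x →
      pvALoop s last k c =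
        pvALoop s last (k + (-(PySem.Int.floordiv (k - x) g)) * g)
          (c + (-(PySem.Int.floordiv (k - x) g))) := by
  intro n
  induction n with
  | zero => intro k c hn hgk hkx; exact absurd hkx (by omega)
  | succ n ih =>
    intro k c hn hgk hkx
    have hklast : k ≤ last := by
      have := pvLeGetLast hs hne hxs
      rw [← hlast] at this; omega
    have hscan : pvScan s k = some g := by
      apply pvScan_eq hs hgs hgk
      intro y hy hyk
      rcases hsplit y hy with h | h
      · exact h
      · omega
    have hceil := pvCeil hg hkx
    rw [pvALoop, dif_pos hklast, hscan]
    simp only [dif_pos hg]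
    by_cases hxkg : x ≤ k + g
    · have ht1 : -(PySem.Int.floordiv (k - x) g) = 1 := by
        have : PySem.Int.floordiv (k - x) g = -1 :=
          (PySem.Int.floordiv_eq_iff_of_pos hg).mpr ⟨by nlinarith, by nlinarith⟩
        omega
      rw [ht1]; ring_nf
    · have hrec := ih (k + g) (c + 1) (by omega) (by omega) (by omega)
      rw [hrec]
      have hfd : PySem.Int.floordiv (k + g - x) g = PySem.Int.floordiv (k - x) g + 1 :=
        pvFloordivStep hg
      rw [hfd]; ring_nf

-- final stage: k is within [last, 2·last), one more absorption of 'last' (or none) ends the loop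
theorem pvFinal {s : List Int} (hs : s.Pairwise (· ≤ ·)) (hne : s ≠ []) {last k c : Int}
    (hlast : last = s.getLast hne) (hg : 0 < last) (hk1 : last ≤ k) (hk2 : k < last + last) :
    pvALoop s last k c = c + PySem.Int.floordiv (last - k) last + 1 := by
  by_cases hkl : k ≤ last
  · have hke : k = last := le_antisymm hkl hk1
    have hscan : pvScan s k = some last := by
      apply pvScan_eq hs (hlast ▸ List.getLast_mem hne) hk1
      intro y hy _
      have := pvLeGetLast hs hne hy
      rw [← hlast] at this; exact this
    rw [pvALoop, dif_pos hkl, hscan]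
    simp only [dif_pos hg]
    rw [pvALoop, dif_neg (by omega)]
    have : PySem.Int.floordiv (last - k) last = 0 :=
      (PySem.Int.floordiv_eq_iff_of_pos hg).mpr ⟨by omega, by omega⟩
    rw [this]; ring
  · rw [pvALoop, dif_neg hkl]
    have : PySem.Int.floordiv (last - k) last = -1 :=
      (PySem.Int.floordiv_eq_iff_of_pos hg).mpr ⟨by nlinarith, by nlinarith⟩
    rw [this]; ring

-- main invariant: A's loop equals B's fold over the remaining suffix plus B's final formula
theorem pvFold {s : List Int} (hs : s.Pairwise (· ≤ ·)) (hne : s ≠ []) {last : Int}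
    (hlast : last = s.getLast hne) :
    ∀ (rest : List Int) (c k g : Int),
      rest.Pairwise (· ≤ ·) → (∀ y ∈ rest, y ∈ s) → g ∈ s → g ≤ k →
      (∀ y ∈ s, y ≤ g ∨ y ∈ rest) → (∀ y ∈ rest, g ≤ y) →
      (k ≤ last ∨ k < g + g) → (∃ z ∈ s, 0 < z ∧ z ≤ k) →
      pvALoop s last k c =
        (match rest.foldl pvBStep (c, k, g) with
         | (c', k', g') => c' + PySem.Int.floordiv (g' - k') g' + 1) := by
  intro rest
  induction rest with
  | nil =>
    intro c k g _ _ hgs hgk hcover _ hk6 hz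
    have hall : ∀ y ∈ s, y ≤ g := by
      intro y hy
      rcases hcover y hy with h | h
      · exact h
      · cases h
    have hgl : g = last := by
      have h1 : last ≤ g := hall _ (hlast ▸ List.getLast_mem hne)
      have h2 : g ≤ last := by rw [hlast]; exact pvLeGetLast hs hne hgs
      omega
    obtain ⟨z, hzs, hz0, hzk⟩ := hz
    have hgpos : 0 < g := lt_of_lt_of_le hz0 (hall z hzs)
    simp only [List.foldl_nil]
    subst hgl
    exact pvFinal hs hne hlast hgpos hgk (by omega)
  | cons x rest' ih =>
    intro c k g hp hsub hgs hgk hcover hlb hk6 hz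
    rcases List.pairwise_cons.mp hp with ⟨hx, hp'⟩
    have hxs : x ∈ s := hsub x (by simp)
    have hgx : g ≤ x := hlb x (by simp)
    simp only [List.foldl_cons]
    by_cases hxk : x ≤ k
    · rw [show pvBStep (c, k, g) x = (c, k, x) by simp [pvBStep, hxk]]
      apply ih c k x hp' (fun y hy => hsub y (by simp [hy])) hxs hxk
      · intro y hy
        rcases hcover y hy with h | h
        · exact Or.inl (le_trans h hgx)
        · rcases List.mem_cons.mp h with rfl | h
          · exact Or.inl (le_refl _)
          · exact Or.inr h
      · exact fun y hy => hx y hy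
      · rcases hk6 with h | h
        · exact Or.inl h
        · exact Or.inr (by omega)
      · exact hz
    · have hkx : k < x := by omega
      have hg0 : 0 < g := by
        obtain ⟨z, hzs, hz0, hzk⟩ := hz
        have hzg : z ≤ g := by
          rcases hcover z hzs with h | h
          · exact h
          · rcases List.mem_cons.mp h with rfl | h
            · omega
            · have := hx z h; omega
        omega
      rw [show pvBStep (c, k, g) x =
            (c + (-(PySem.Int.floordiv (k - x) g)),
             k + (-(PySem.Int.floordiv (k - x) g)) * g, x) by
          simp [pvBStep, hxk]]
      have hsplit : ∀ y ∈ s, y ≤ g ∨ x ≤ y := by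
        intro y hy
        rcases hcover y hy with h | h
        · exact Or.inl h
        · rcases List.mem_cons.mp h with rfl | h
          · exact Or.inr (le_refl _)
          · exact Or.inr (hx y h)
      have hceil := pvCeil hg0 hkx
      rw [pvRun hs hne hlast hgs hxs hg0 hsplit ((x - k).toNat) k c (le_refl _) hgk hkx]
      apply ih _ _ x hp' (fun y hy => hsub y (by simp [hy])) hxs (by omega)
      · intro y hy
        rcases hcover y hy with h | h
        · exact Or.inl (le_trans h hgx)
        · rcases List.mem_cons.mp h with rfl | h
          · exact Or.inl (le_refl _)
          · exact Or.inr h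
      · exact fun y hy => hx y hy
      · exact Or.inr (by nlinarith [hceil.2.2])
      · obtain ⟨z, hzs, hz0, hzk⟩ := hz
        exact ⟨z, hzs, hz0, by nlinarith [hceil.2.1]⟩

-- ===== VERDICT (by name: the statement is the Claim_ definition above) =====
theorem minimumNumberOfFish_spec : Claim_equal_minimumNumberOfFish := by
  intro w k _ hpre
  unfold Spec_minimumNumberOfFish minimumNumberOfFish minimumNumberOfFish_alt
  obtain ⟨hne, hdisj⟩ := hpre
  have hsne : PySem.List.sorted w (fun x => x) false ≠ [] := by
    simpa [PySem.List.sorted_eq_nil_iff] using hne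
  have hs : (PySem.List.sorted w (fun x => x) false).Pairwise (· ≤ ·) := by
    simpa using PySem.List.sorted_pairwise w (fun x => x)
  have hmem : ∀ x : Int, x ∈ PySem.List.sorted w (fun x => x) false ↔ x ∈ w :=
    fun x => PySem.List.mem_sorted w (fun x => x) false x
  cases hseq : PySem.List.sorted w (fun x => x) false with
  | nil => exact absurd hseq hsne
  | cons a t =>
    rw [hseq] at hs hmem
    by_cases h1 : k < a
    · simp [h1]
    · simp only [if_neg h1]
      by_cases h2 : k > (a :: t).getLast (List.cons_ne_nil a t)
      · simp [h2]
      · simp only [if_neg h2]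
        have hak : a ≤ k := by omega
        rcases List.pairwise_cons.mp hs with ⟨ha, ht⟩
        have hz : ∃ z ∈ a :: t, 0 < z ∧ z ≤ k := by
          rcases hdisj with h | h | h
          · have := h a ((hmem a).mp (by simp)); omega
          · have hlmem : (a :: t).getLast (List.cons_ne_nil a t) ∈ a :: t :=
              List.getLast_mem _
            have := h _ ((hmem _).mp hlmem)
            omega
          · obtain ⟨z, hzw, hz0, hzk⟩ := h
            exact ⟨z, (hmem z).mpr hzw, hz0, hzk⟩
        exact pvFold hs (List.cons_ne_nil a t) rfl t 0 k a ht
          (fun y hy => by simp [hy]) (by simp) hak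
          (fun y hy => by
            rcases List.mem_cons.mp hy with rfl | hy
            · exact Or.inl (le_refl _)
            · exact Or.inr hy)
          (fun y hy => ha y hy)
          (Or.inl (by omega)) hz
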